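-- pv_equiv track=rewrite | github.com/FernandoRB-rgb/Aplicaciones-web | contraseñas.py | is_name_valid
-- ===== SOURCE A (Python) =====
-- def is_name_valid(s: str) -> bool:
--     # Acepta letras (incluye acentos y ñ) y espacios. Rechaza vacío.
--     if not s or not s.strip():
--         return False
--     # comprobar caracter por caracter usando .isalpha() o espacio
--     for ch in s:
--         if ch.isspace():  # Usar isspace() en lugar de comparar con ' '
--             continue
--         if not ch.isalpha():   # isalpha acepta letras acentuadas y ñ
--             return False
--     return True
-- ===== SOURCE B (Python) =====
-- def is_name_valid(s: str) -> bool: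
--     # Transform-then-validate: drop all whitespace, then one isalpha() library check.
--     return "".join(s.split()).isalpha()
-- ===== Notes on version B (the rewrite author's own statement) =====
-- stated objective: idiomatic
-- what changed: Replaces A's explicit char-by-char loop with strip/per-char guards by a transform-then-validate one-liner: join s.split() with the empty separator to drop all whitespace, then return .isalpha() on the result, which subsumes A's guards and per-char tests.
import Mathlib
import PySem

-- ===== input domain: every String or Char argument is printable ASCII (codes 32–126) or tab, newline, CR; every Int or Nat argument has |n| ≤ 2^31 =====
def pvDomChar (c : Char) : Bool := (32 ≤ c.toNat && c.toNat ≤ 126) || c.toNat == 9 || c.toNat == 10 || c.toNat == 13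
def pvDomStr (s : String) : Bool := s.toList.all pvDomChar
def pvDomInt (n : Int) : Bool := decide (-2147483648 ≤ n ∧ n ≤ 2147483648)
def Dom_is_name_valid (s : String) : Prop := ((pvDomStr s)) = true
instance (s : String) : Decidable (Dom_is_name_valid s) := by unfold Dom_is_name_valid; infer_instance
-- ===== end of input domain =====

-- B replaces A's explicit per-character loop (with empty/strip guards) by a transform-then-validate
-- pass: join "" (split s) removes all whitespace, then one isalpha() check (C-level library calls replace the Python-level loop).

-- ===== PORT A =====
-- the 'for ch in s' loop of A, step for step
def is_name_valid_go : List Char → Bool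
  | [] => true
  | c :: rest =>
    if PySem.Chars.isspace c then is_name_valid_go rest
    else if !(PySem.Chars.isalpha c) then false
    else is_name_valid_go rest

def is_name_valid (s : String) : Bool :=
  if s == "" || PySem.Str.strip s == "" then false
  else is_name_valid_go s.toList

-- ===== PORT B =====
def is_name_valid_alt (s : String) : Bool :=
  PySem.Str.strIsalpha (PySem.Str.join "" (PySem.Str.split₀ s))

-- ===== PRECONDITION & SPEC =====
def Spec_is_name_valid (s : String) (out : Bool) : Prop := out = is_name_valid_alt s
instance (s : String) (out : Bool) : Decidable (Spec_is_name_valid s out) := by unfold Spec_is_name_valid; infer_instance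

-- ===== CLAIM (what is proved, stated in full; the proofs are below) =====
def Claim_equal_is_name_valid : Prop := ∀ (s : String), Dom_is_name_valid s → Spec_is_name_valid s (is_name_valid s)

-- ===== LEMMAS AND PROOFS =====

-- split₀.go invariant: flattening the produced word list gives the non-whitespace characters
lemma split₀_go_flatten (rest cur : List Char) (acc : List (List Char)) :
    (PySem.Chars.split₀.go rest cur acc).flatten
      = acc.reverse.flatten ++ cur.reverse ++ rest.filter (fun c => !PySem.Chars.isspace c) := by
  induction rest generalizing cur acc with
  | nil =>
    simp only [PySem.Chars.split₀.go, List.filter_nil, List.append_nil]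
    by_cases h : cur.isEmpty
    · simp_all
    · simp_all [List.flatten_append]
  | cons c rest ih =>
    simp only [PySem.Chars.split₀.go]
    by_cases hs : PySem.Chars.isspace c
    · by_cases hc : cur.isEmpty <;>
        simp_all [List.flatten_append]
    · simp_all

lemma join_nil_eq_flatten (parts : List (List Char)) :
    PySem.Chars.join [] parts = parts.flatten := by
  induction parts with
  | nil => simp [PySem.Chars.join, List.intercalate]
  | cons p parts ih =>
    cases parts with
    | nil => simp [PySem.Chars.join, List.intercalate, List.intersperse]
    | cons q parts =>
      simp_all [PySem.Chars.join, List.intercalate, List.intersperse]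

lemma join_split₀_eq_filter (cs : List Char) :
    PySem.Chars.join [] (PySem.Chars.split₀ cs)
      = cs.filter (fun c => !PySem.Chars.isspace c) := by
  simp [join_nil_eq_flatten, PySem.Chars.split₀, split₀_go_flatten]

lemma go_eq_all (cs : List Char) :
    is_name_valid_go cs
      = cs.all (fun c => PySem.Chars.isspace c || PySem.Chars.isalpha c) := by
  induction cs with
  | nil => rfl
  | cons c rest ih =>
    simp only [is_name_valid_go, ih, List.all_cons]
    by_cases hs : PySem.Chars.isspace c
    · simp [hs]
    · by_cases ha : PySem.Chars.isalpha c <;> simp [hs, ha]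

lemma strip_eq_nil_iff (cs : List Char) :
    PySem.Chars.strip cs = [] ↔ ∀ c ∈ cs, PySem.Chars.isspace c = true := by
  simp only [PySem.Chars.strip, PySem.Chars.rstrip, PySem.Chars.lstrip,
    List.reverse_eq_nil_iff, List.dropWhile_eq_nil_iff, List.mem_reverse]
  constructor
  · intro h c hc
    rw [← List.takeWhile_append_dropWhile (p := PySem.Chars.isspace) (l := cs)] at hc
    rcases List.mem_append.mp hc with h1 | h1
    · exact List.mem_takeWhile_imp h1
    · exact h c h1
  · intro h c hc
    exact h c (List.dropWhile_subset _ hc)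

-- ===== VERDICT (by name: the statement is the Claim_ definition above) =====
theorem is_name_valid_spec : Claim_equal_is_name_valid := by
  intro s _
  unfold Spec_is_name_valid
  have halt : is_name_valid_alt s
      = PySem.Chars.strIsalpha (s.toList.filter (fun c => !PySem.Chars.isspace c)) := by
    simp [is_name_valid_alt, PySem.Str.strIsalpha, PySem.Str.join, PySem.Str.split₀,
      Function.comp_def, join_split₀_eq_filter]
  rw [halt]
  by_cases hall : ∀ c ∈ s.toList, PySem.Chars.isspace c = true
  · -- A's guard fires; B's cleaned string is empty
    have hfil : s.toList.filter (fun c => !PySem.Chars.isspace c) = [] := by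
      simp only [List.filter_eq_nil_iff]
      intro c hc; simp [hall c hc]
    have hstrip : PySem.Str.strip s = "" := by
      simp [PySem.Str.strip, (strip_eq_nil_iff s.toList).mpr hall]
    simp [is_name_valid, hstrip, hfil, PySem.Chars.strIsalpha]
  · -- some non-space char exists: A's guard does not fire
    obtain ⟨c, hc, hcs⟩ : ∃ c ∈ s.toList, PySem.Chars.isspace c = false := by
      rcases not_forall.mp hall with ⟨c, hcimp⟩
      rcases Classical.not_imp.mp hcimp with ⟨hc, hcs⟩
      exact ⟨c, hc, by simpa using hcs⟩
    have hsne : s ≠ "" := by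
      intro h; subst h; simp at hc
    have hstrip : PySem.Str.strip s ≠ "" := by
      intro h
      have : PySem.Chars.strip s.toList = [] := by
        have := congrArg String.toList h
        simpa [PySem.Str.strip] using this
      simp [(strip_eq_nil_iff s.toList).mp this c hc] at hcs
    have hguard : (s == "" || PySem.Str.strip s == "") = false := by
      simp [hsne, hstrip]
    rw [is_name_valid, hguard]
    simp only [Bool.false_eq_true, if_false, go_eq_all, PySem.Chars.strIsalpha]
    have hne : s.toList.filter (fun c => !PySem.Chars.isspace c) ≠ [] := by
      intro h
      have := List.filter_eq_nil_iff.mp h c hc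
      simp [hcs] at this
    have hfne : (s.toList.filter (fun c => !PySem.Chars.isspace c)).isEmpty = false := by
      rw [List.isEmpty_eq_false_iff]
      exact hne
    rw [hfne]
    simp only [Bool.not_false, Bool.true_and]
    rw [Bool.eq_iff_iff]
    simp only [List.all_eq_true, List.mem_filter]
    constructor
    · intro h x ⟨hx, hxs⟩
      have := h x hx
      rcases Bool.or_eq_true_iff.mp this with h1 | h1
      · rw [h1] at hxs; simp at hxs
      · exact h1
    · intro h x hx
      by_cases hxs : PySem.Chars.isspace x
      · simp [hxs]
      · simp [h x ⟨hx, by simp [hxs]⟩]
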